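-- pv_equiv track=rewrite | github.com/Bushrut/EGE2024 | komivaizh.py | find_maximum_distance
-- ===== SOURCE A (Python) =====
-- def find_maximum_distance(distances):
--     num_cities = len(distances)
--     max_distance = 0
--     path_temp = []
--     path_max = []
--     for i in range(num_cities):
--         for j in range(num_cities):
--             if i == j:
--                 continue
--             distance = distances[i][j]
--             path_temp.append(distances[i][j])
--             for k in range(num_cities):
--                 if k == i or k == j:
--                     continue
--                 distance += distances[j][k]
--                 path_temp.append(distances[j][k])
--             if max_distance < distance:
--                 max_distance = distance
--                 path_max = path_temp.copy()
--                 path_temp = []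
--             else:
--                 path_temp = []
--
--     return max_distance, path_max
-- ===== SOURCE B (Python) =====
-- def find_maximum_distance(distances):
--     # Precompute diagonal-free row sums, scan pairs in O(n^2), reconstruct the winning path once.
--     n = len(distances)
--     row_sums = [sum(v for k, v in enumerate(row[:n]) if k != j)
--                 for j, row in enumerate(distances)]
--     best = 0
--     best_pair = None
--     for i in range(n):
--         for j in range(n):
--             if i == j:
--                 continue
--             value = distances[i][j] + row_sums[j] - distances[j][i]
--             if best < value:
--                 best = value
--                 best_pair = (i, j)
--     if best_pair is None:
--         return 0, []
--     i, j = best_pair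
--     path = [distances[i][j]] + [distances[j][k] for k in range(n) if k != i and k != j]
--     return best, path
-- ===== Notes on version B (the rewrite author's own statement) =====
-- stated objective: faster
-- what changed: A recomputes each pair's path sum with an inner O(n) loop (O(n^3) total); B precomputes diagonal-free row sums once, scans all pairs in O(1) each, and reconstructs only the winning path at the end.
import Mathlib
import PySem

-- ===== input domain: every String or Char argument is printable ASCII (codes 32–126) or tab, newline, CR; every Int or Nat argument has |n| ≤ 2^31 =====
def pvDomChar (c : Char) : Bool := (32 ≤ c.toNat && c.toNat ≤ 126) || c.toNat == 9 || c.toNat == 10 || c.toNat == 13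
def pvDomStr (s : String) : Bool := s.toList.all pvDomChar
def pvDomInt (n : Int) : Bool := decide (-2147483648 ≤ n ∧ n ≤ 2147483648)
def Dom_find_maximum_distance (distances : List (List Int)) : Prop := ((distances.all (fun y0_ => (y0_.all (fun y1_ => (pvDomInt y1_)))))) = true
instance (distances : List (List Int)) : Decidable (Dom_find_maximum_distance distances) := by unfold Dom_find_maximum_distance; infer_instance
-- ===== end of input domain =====

-- B replaces A's O(n^3) triple loop by diagonal-free row sums precomputed once, an O(n^2) scan
-- over pairs, and a single reconstruction of the winning path (objective: faster).

-- ===== PORT A =====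
-- innermost k-loop body of A
def pvA_k (D : List (List Int)) (i j : Int) (dp : Int × List Int) (k : Int) : Int × List Int :=
  if k == i || k == j then dp
  else (dp.1 + PySem.List.pyGetD (PySem.List.pyGetD D j []) k 0,
        dp.2 ++ [PySem.List.pyGetD (PySem.List.pyGetD D j []) k 0])

-- body of A's j-loop: state is (max_distance, path_temp, path_max)
def pvA_j (D : List (List Int)) (n i : Int) (st : Int × List Int × List Int) (j : Int) :
    Int × List Int × List Int :=
  if i == j then st
  else
    let dij := PySem.List.pyGetD (PySem.List.pyGetD D i []) j 0
    let inner := (PySem.List.pyRange 0 n 1).foldl (pvA_k D i j) (dij, st.2.1 ++ [dij])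
    if st.1 < inner.1 then (inner.1, ([] : List Int), inner.2)
    else (st.1, ([] : List Int), st.2.2)

def pvA_i (D : List (List Int)) (n : Int) (st : Int × List Int × List Int) (i : Int) :
    Int × List Int × List Int :=
  (PySem.List.pyRange 0 n 1).foldl (pvA_j D n i) st

def find_maximum_distance (distances : List (List Int)) : Int × List Int :=
  let n : Int := distances.length
  let st := (PySem.List.pyRange 0 n 1).foldl (pvA_i distances n)
      ((0 : Int), ([] : List Int), ([] : List Int))
  (st.1, st.2.2)

-- ===== PORT B =====
-- row_sums entry: sum(v for k, v in enumerate(row[:n]) if k != j)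
def pvB_rowsum (n : Int) (jrow : Int × List Int) : Int :=
  ((PySem.List.enumerate (PySem.List.slice jrow.2 none (some n))).filter
      (fun kv => !(kv.1 == jrow.1))).foldl (fun a kv => a + kv.2) 0

-- body of B's j-loop: state is (best, best_pair)
def pvB_j (D : List (List Int)) (rowSums : List Int) (i : Int)
    (st : Int × Option (Int × Int)) (j : Int) : Int × Option (Int × Int) :=
  if i == j then st
  else
    let value := PySem.List.pyGetD (PySem.List.pyGetD D i []) j 0
      + PySem.List.pyGetD rowSums j 0
      - PySem.List.pyGetD (PySem.List.pyGetD D j []) i 0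
    if st.1 < value then (value, some (i, j)) else st

def pvB_i (D : List (List Int)) (n : Int) (rowSums : List Int)
    (st : Int × Option (Int × Int)) (i : Int) : Int × Option (Int × Int) :=
  (PySem.List.pyRange 0 n 1).foldl (pvB_j D rowSums i) st

def find_maximum_distance_alt (distances : List (List Int)) : Int × List Int :=
  let n : Int := distances.length
  let rowSums := (PySem.List.enumerate distances).map (pvB_rowsum n)
  let st := (PySem.List.pyRange 0 n 1).foldl (pvB_i distances n rowSums)
      ((0 : Int), (none : Option (Int × Int)))
  match st.2 with
  | none => ((0 : Int), ([] : List Int))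
  | some (i, j) =>
      (st.1, PySem.List.pyGetD (PySem.List.pyGetD distances i []) j 0 ::
        ((PySem.List.pyRange 0 n 1).filter (fun k => !(k == i) && !(k == j))).map
          (fun k => PySem.List.pyGetD (PySem.List.pyGetD distances j []) k 0))

-- ===== PRECONDITION & SPEC =====
-- Pre_ holds exactly where the Python A returns normally (no IndexError): row r is read at
-- every index in {0,…,n-1}\{r}, so every row needs length ≥ n except the last, which needs n-1.
def Pre_find_maximum_distance (distances : List (List Int)) : Prop :=
  ∀ p ∈ PySem.List.enumerate distances,
    (if p.1 = (distances.length : Int) - 1 then (distances.length : Int) - 1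
     else (distances.length : Int)) ≤ p.2.length

instance (distances : List (List Int)) : Decidable (Pre_find_maximum_distance distances) := by
  unfold Pre_find_maximum_distance; infer_instance

def pvWitness_find_maximum_distance : List (List Int) := [[0, 1], [1, 0]]

def Spec_find_maximum_distance (distances : List (List Int)) (out : Int × List Int) : Prop := out = find_maximum_distance_alt distances
instance (distances : List (List Int)) (out : Int × List Int) : Decidable (Spec_find_maximum_distance distances out) := by unfold Spec_find_maximum_distance; infer_instance

-- ===== CLAIM (what is proved, stated in full; the proofs are below) =====
def Claim_equal_find_maximum_distance : Prop := ∀ (distances : List (List Int)), Dom_find_maximum_distance distances → Pre_find_maximum_distance distances → Spec_find_maximum_distance distances (find_maximum_distance distances)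

-- ===== LEMMAS AND PROOFS =====

def pvD (D : List (List Int)) (j k : Int) : Int :=
  PySem.List.pyGetD (PySem.List.pyGetD D j []) k 0

lemma pvGetD_cons_pos {α : Type} (x : α) (xs : List α) (m : Int) (d : α) (h : 1 ≤ m) :
    PySem.List.pyGetD (x :: xs) m d = PySem.List.pyGetD xs (m - 1) d := by
  simp only [PySem.List.pyGetD, PySem.List.pyGet?, PySem.List.pyIdx?]
  rw [if_pos (by omega : (0:Int) ≤ m), if_pos (by omega : (0:Int) ≤ m - 1)]
  by_cases hlt : m < ((x :: xs).length : Int)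
  · rw [if_pos hlt, if_pos (by simp at hlt ⊢; omega)]
    simp only [Option.bind_some]
    have hk : m.toNat = (m - 1).toNat + 1 := by omega
    rw [hk]
    simp
  · rw [if_neg hlt, if_neg (by simp at hlt ⊢; omega)]
    simp

lemma pvEnum_getElem {α : Type} : ∀ (xs : List α) (s : Int) (k : Nat)
    (h : k < (PySem.List.enumerate xs s).length),
    (PySem.List.enumerate xs s)[k] = (s + k, xs[k]'(by simpa [PySem.List.length_enumerate] using h))
  | [], s, k, h => by simp [PySem.List.enumerate_nil] at h
  | x :: xs, s, 0, h => by simp [PySem.List.enumerate_cons]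
  | x :: xs, s, k + 1, h => by
    simp only [PySem.List.enumerate_cons, List.getElem_cons_succ]
    rw [pvEnum_getElem xs (s+1) k (by simp [PySem.List.length_enumerate] at h ⊢; omega)]
    have : s + 1 + (k:Int) = s + ((k:Nat)+1 : Nat) := by push_cast; ring
    rw [this]

lemma pvFoldl_add_snd : ∀ (l : List (Int × Int)) (a : Int),
    l.foldl (fun a kv => a + kv.2) a = a + (l.map (·.2)).sum
  | [], a => by simp
  | kv :: l, a => by
    simp only [List.foldl_cons, List.map_cons, List.sum_cons]
    rw [pvFoldl_add_snd l]; ring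

lemma pvRowsum_eq : ∀ (row : List Int) (s t : Nat) (j : Int),
    (((PySem.List.enumerate (row.take t) (s : Int)).filter (fun kv => !(kv.1 == j))).map (·.2)).sum
      = (((PySem.List.pyRange (s : Int) ((s : Int) + (t : Int)) 1).filter (fun k => !(k == j))).map
          (fun k => PySem.List.pyGetD row (k - (s : Int)) 0)).sum
  | [], s, t, j => by
    simp only [List.take_nil, PySem.List.enumerate_nil, List.filter_nil, List.map_nil,
      List.sum_nil]
    rw [eq_comm, List.sum_eq_zero]
    intro x hx
    simp only [List.mem_map, List.mem_filter] at hx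
    obtain ⟨k, hk, hxeq⟩ := hx
    rw [← hxeq]
    simp only [PySem.List.pyGetD, PySem.List.pyGet?, PySem.List.pyIdx?]
    split_ifs <;> simp
  | x :: xs, s, 0, j => by
    simp [PySem.List.enumerate_nil, PySem.List.pyRange_one_eq_nil (le_refl (s:Int))]
  | x :: xs, s, t + 1, j => by
    have hcons : PySem.List.pyRange (s : Int) ((s : Int) + ((t : Int) + 1)) 1
        = (s : Int) :: PySem.List.pyRange ((s : Int) + 1) ((s : Int) + ((t : Int) + 1)) 1 :=
      PySem.List.pyRange_one_cons (by omega)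
    have htail : ((PySem.List.pyRange ((s : Int) + 1) ((s : Int) + ((t : Int) + 1)) 1).filter
          (fun k => !(k == j))).map (fun k => PySem.List.pyGetD (x :: xs) (k - (s : Int)) 0)
        = ((PySem.List.pyRange ((s : Int) + 1) ((s : Int) + ((t : Int) + 1)) 1).filter
          (fun k => !(k == j))).map (fun k => PySem.List.pyGetD xs (k - ((s : Int) + 1)) 0) := by
      apply List.map_congr_left
      intro k hk
      have hm := List.mem_of_mem_filter hk
      rw [PySem.List.mem_pyRange_one] at hm
      rw [pvGetD_cons_pos _ _ _ _ (by omega)]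
      congr 1; ring
    have IH := pvRowsum_eq xs (s + 1) t j
    push_cast at IH
    have hstep : (s : Int) + 1 + (t : Int) = (s : Int) + ((t : Int) + 1) := by ring
    rw [hstep] at IH
    simp only [List.take_succ_cons, PySem.List.enumerate_cons]
    push_cast
    rw [hcons, List.filter_cons, List.filter_cons]
    rcases Bool.eq_false_or_eq_true ((s : Int) == j) with hb | hb
    · -- s = j: the head is dropped on both sides
      simp only [hb, Bool.not_true, Bool.false_eq_true, if_false]
      rw [htail, IH]
    · -- s ≠ j: the head survives on both sides
      simp only [hb, Bool.not_false, if_true, List.map_cons, List.sum_cons,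
        PySem.List.pyGetD_zero_cons, sub_self]
      rw [htail, IH]

lemma pvSum_mem (f : Int → Int) : ∀ (L : List Int) (i : Int), L.Nodup → i ∈ L →
    (L.map f).sum = f i + ((L.filter (fun k => !(k == i))).map f).sum
  | [], i, _, hi => by simp at hi
  | a :: L, i, hnd, hi => by
    rcases List.nodup_cons.mp hnd with ⟨ha, hndL⟩
    rw [List.mem_cons] at hi
    by_cases hia : i = a
    · subst hia
      have hfil : L.filter (fun k => !(k == i)) = L :=
        List.filter_eq_self.mpr (fun b hb => by
          simp only [Bool.not_eq_eq_eq_not, Bool.not_true, beq_eq_false_iff_ne, ne_eq]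
          rintro rfl; exact ha hb)
      simp [hfil]
    · have hiL : i ∈ L := hi.resolve_left hia
      have := pvSum_mem f L i hndL hiL
      simp only [List.map_cons, List.sum_cons, this, List.filter_cons]
      have : (!(a == i)) = true := by simp [Ne.symm hia]
      simp [this]
      ring

lemma pvSum_remove (n i j : Int) (f : Int → Int) (h0 : 0 ≤ i) (hn : i < n) (hij : i ≠ j) :
    ((((PySem.List.pyRange 0 n 1).filter (fun k => !(k == j))).map f).sum)
      = f i + (((PySem.List.pyRange 0 n 1).filter (fun k => !(k == i) && !(k == j))).map f).sum := by
  have hnd : ((PySem.List.pyRange 0 n 1).filter (fun k => !(k == j))).Nodup :=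
    (PySem.List.nodup_pyRange_one 0 n).filter _
  have hi : i ∈ (PySem.List.pyRange 0 n 1).filter (fun k => !(k == j)) := by
    rw [List.mem_filter, PySem.List.mem_pyRange_one]
    refine ⟨⟨h0, hn⟩, by simpa using hij⟩
  rw [pvSum_mem f _ i hnd hi, List.filter_filter]

lemma pvA_inner (D : List (List Int)) (i j : Int) : ∀ (l : List Int) (a : Int) (p : List Int),
    l.foldl (pvA_k D i j) (a, p)
      = (a + ((l.filter (fun k => !(k == i) && !(k == j))).map (pvD D j)).sum,
         p ++ (l.filter (fun k => !(k == i) && !(k == j))).map (pvD D j))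
  | [], a, p => by simp
  | k :: l, a, p => by
    simp only [List.foldl_cons, List.filter_cons]
    rcases Bool.eq_false_or_eq_true (k == i || k == j) with hk | hk
    · -- k = i or k = j: skipped
      have hpred : (!(k == i) && !(k == j)) = false := by
        rcases Bool.or_eq_true_iff.mp hk with h1 | h1 <;> simp [h1]
      have hstep : pvA_k D i j (a, p) k = (a, p) := by
        simp only [pvA_k, hk, if_true]
      rw [hstep, pvA_inner D i j l, hpred]
      simp
    · -- k is neither i nor j: the entry is accumulated
      have hpred : (!(k == i) && !(k == j)) = true := by
        rcases Bool.or_eq_false_iff.mp hk with ⟨h1, h2⟩; simp [h1, h2]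
      have hstep : pvA_k D i j (a, p) k = (a + pvD D j k, p ++ [pvD D j k]) := by
        simp only [pvA_k, hk, Bool.false_eq_true, if_false]
        rfl
      rw [hstep, pvA_inner D i j l, hpred]
      simp only [if_true, List.map_cons, List.sum_cons, Prod.mk.injEq]
      exact ⟨by ring, by simp⟩

def pvFlt (n i j : Int) : List Int :=
  (PySem.List.pyRange 0 n 1).filter (fun k => !(k == i) && !(k == j))

def pvPath (D : List (List Int)) (n i j : Int) : List Int :=
  pvD D i j :: (pvFlt n i j).map (pvD D j)

def pvVal (D : List (List Int)) (n i j : Int) : Int :=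
  pvD D i j + ((pvFlt n i j).map (pvD D j)).sum

def pvRender (D : List (List Int)) (n : Int) : Option (Int × Int) → List Int
  | none => []
  | some (i, j) => pvPath D n i j

lemma pvVal_eq (D : List (List Int)) (i j : Int)
    (h0i : 0 ≤ i) (hin : i < (D.length : Int)) (h0j : 0 ≤ j) (hjn : j < (D.length : Int))
    (hij : ¬ i = j) :
    pvD D i j + PySem.List.pyGetD ((PySem.List.enumerate D).map (pvB_rowsum (D.length : Int))) j 0
        - pvD D j i
      = pvVal D (D.length : Int) i j := by
  set n : Int := (D.length : Int) with hn
  have hjlen : j.toNat < D.length := by omega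
  have hrow : PySem.List.pyGetD D j [] = D[j.toNat] :=
    PySem.List.pyGetD_eq_getElem D [] h0j (by simpa using hjn)
  set row : List Int := D[j.toNat] with hrowdef
  -- the row_sums entry at j
  have h1 : PySem.List.pyGetD ((PySem.List.enumerate D).map (pvB_rowsum n)) j 0
      = pvB_rowsum n ((j : Int), row) := by
    rw [PySem.List.pyGetD_eq_getElem _ 0 h0j
      (by simp [PySem.List.length_enumerate]; omega)]
    rw [List.getElem_map, pvEnum_getElem D 0 j.toNat (by simp [PySem.List.length_enumerate]; omega)]
    have hcast : (0 : Int) + (j.toNat : Int) = j := by omega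
    rw [hcast]
  have h2 : pvB_rowsum n ((j : Int), row)
      = (((PySem.List.pyRange 0 n 1).filter (fun k => !(k == j))).map
          (fun k => PySem.List.pyGetD row k 0)).sum := by
    have hto : PySem.List.slice row none (some n) = row.take n.toNat :=
      PySem.List.slice_to row (by omega)
    simp only [pvB_rowsum] at *
    rw [hto, pvFoldl_add_snd, zero_add]
    have h0 : ((0 : Nat) : Int) = 0 := rfl
    have := pvRowsum_eq row 0 n.toNat j
    rw [h0] at this
    rw [this]
    have hnn : (0 : Int) + (n.toNat : Int) = n := by omega
    rw [hnn]
    apply congrArg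
    apply List.map_congr_left
    intro k _
    rw [sub_zero]
  have h3 : (fun k => PySem.List.pyGetD row k 0) = pvD D j := by
    funext k
    rw [pvD, hrow]
  rw [h1, h2, h3]
  rw [pvSum_remove n i j (pvD D j) h0i hin hij]
  rw [pvVal, pvFlt]
  ring

lemma pvLoop_j (D : List (List Int)) (i : Int)
    (h0i : 0 ≤ i) (hin : i < (D.length : Int)) :
    ∀ (l : List Int) (m : Int) (o : Option (Int × Int)),
    (∀ x ∈ l, 0 ≤ x ∧ x < (D.length : Int)) → (o = none → m = 0) →
    l.foldl (pvA_j D (D.length : Int) i) (m, [], pvRender D (D.length : Int) o)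
      = ((l.foldl (pvB_j D ((PySem.List.enumerate D).map (pvB_rowsum (D.length : Int))) i) (m, o)).1,
         [],
         pvRender D (D.length : Int)
           (l.foldl (pvB_j D ((PySem.List.enumerate D).map (pvB_rowsum (D.length : Int))) i) (m, o)).2)
    ∧ ((l.foldl (pvB_j D ((PySem.List.enumerate D).map (pvB_rowsum (D.length : Int))) i) (m, o)).2 = none
        → (l.foldl (pvB_j D ((PySem.List.enumerate D).map (pvB_rowsum (D.length : Int))) i) (m, o)).1 = 0)
  | [], m, o, _, ho => ⟨rfl, ho⟩
  | j :: l, m, o, hsub, ho => by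
    have hj := hsub j (List.mem_cons_self)
    have hsub' : ∀ x ∈ l, 0 ≤ x ∧ x < (D.length : Int) :=
      fun x hx => hsub x (List.mem_cons_of_mem _ hx)
    simp only [List.foldl_cons]
    rcases Bool.eq_false_or_eq_true (i == j) with hij | hij
    · -- i = j : skipped on both sides
      have hstepA : pvA_j D (D.length : Int) i (m, [], pvRender D (D.length : Int) o) j
          = (m, [], pvRender D (D.length : Int) o) := by
        simp only [pvA_j, hij, if_true]
      have hstepB : pvB_j D ((PySem.List.enumerate D).map (pvB_rowsum (D.length : Int))) i (m, o) j
          = (m, o) := by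
        simp only [pvB_j, hij, if_true]
      rw [hstepA, hstepB]
      exact pvLoop_j D i h0i hin l _ _ hsub' ho
    · -- i ≠ j : a genuine pair
      have hne : ¬ i = j := by simpa using hij
      have hstepA : pvA_j D (D.length : Int) i (m, [], pvRender D (D.length : Int) o) j
          = if m < pvVal D (D.length : Int) i j
            then (pvVal D (D.length : Int) i j, [], pvPath D (D.length : Int) i j)
            else (m, [], pvRender D (D.length : Int) o) := by
        simp only [pvA_j, hij, Bool.false_eq_true, if_false]
        rw [pvA_inner]
        simp only [List.nil_append, List.singleton_append, pvVal, pvPath, pvFlt, pvD]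
      have hstepB : pvB_j D ((PySem.List.enumerate D).map (pvB_rowsum (D.length : Int))) i (m, o) j
          = if m < pvVal D (D.length : Int) i j
            then (pvVal D (D.length : Int) i j, some (i, j))
            else (m, o) := by
        simp only [pvB_j, hij, Bool.false_eq_true, if_false]
        rw [show PySem.List.pyGetD (PySem.List.pyGetD D i []) j 0
              + PySem.List.pyGetD ((PySem.List.enumerate D).map (pvB_rowsum (D.length : Int))) j 0
              - PySem.List.pyGetD (PySem.List.pyGetD D j []) i 0
            = pvVal D (D.length : Int) i j from
          pvVal_eq D i j h0i hin hj.1 hj.2 hne]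
      rw [hstepA, hstepB]
      by_cases hlt : m < pvVal D (D.length : Int) i j
      · rw [if_pos hlt, if_pos hlt]
        have : pvPath D (D.length : Int) i j
            = pvRender D (D.length : Int) (some (i, j)) := rfl
        rw [this]
        exact pvLoop_j D i h0i hin l _ _ hsub' (by simp)
      · rw [if_neg hlt, if_neg hlt]
        exact pvLoop_j D i h0i hin l _ _ hsub' ho

lemma pvLoop_i (D : List (List Int)) :
    ∀ (l : List Int) (m : Int) (o : Option (Int × Int)),
    (∀ x ∈ l, 0 ≤ x ∧ x < (D.length : Int)) → (o = none → m = 0) →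
    l.foldl (pvA_i D (D.length : Int)) (m, [], pvRender D (D.length : Int) o)
      = ((l.foldl (pvB_i D (D.length : Int) ((PySem.List.enumerate D).map (pvB_rowsum (D.length : Int)))) (m, o)).1,
         [],
         pvRender D (D.length : Int)
           (l.foldl (pvB_i D (D.length : Int) ((PySem.List.enumerate D).map (pvB_rowsum (D.length : Int)))) (m, o)).2)
    ∧ ((l.foldl (pvB_i D (D.length : Int) ((PySem.List.enumerate D).map (pvB_rowsum (D.length : Int)))) (m, o)).2 = none
        → (l.foldl (pvB_i D (D.length : Int) ((PySem.List.enumerate D).map (pvB_rowsum (D.length : Int)))) (m, o)).1 = 0)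
  | [], m, o, _, ho => ⟨rfl, ho⟩
  | i :: l, m, o, hsub, ho => by
    have hi := hsub i (List.mem_cons_self)
    have hsub' : ∀ x ∈ l, 0 ≤ x ∧ x < (D.length : Int) :=
      fun x hx => hsub x (List.mem_cons_of_mem _ hx)
    simp only [List.foldl_cons]
    have hrange : ∀ x ∈ PySem.List.pyRange 0 (D.length : Int) 1, 0 ≤ x ∧ x < (D.length : Int) := by
      intro x hx
      rw [PySem.List.mem_pyRange_one] at hx
      exact hx
    obtain ⟨heq, hinv⟩ := pvLoop_j D i hi.1 hi.2 (PySem.List.pyRange 0 (D.length : Int) 1) m o hrange ho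
    rw [pvA_i, heq]
    exact pvLoop_i D l _ _ hsub' hinv

lemma pv_main (D : List (List Int)) : find_maximum_distance D = find_maximum_distance_alt D := by
  have hrange : ∀ x ∈ PySem.List.pyRange 0 (D.length : Int) 1, 0 ≤ x ∧ x < (D.length : Int) := by
    intro x hx
    rw [PySem.List.mem_pyRange_one] at hx
    exact hx
  obtain ⟨heq, hinv⟩ := pvLoop_i D (PySem.List.pyRange 0 (D.length : Int) 1) 0 none hrange (fun _ => rfl)
  rw [find_maximum_distance, find_maximum_distance_alt]
  have h0 : pvRender D (D.length : Int) none = [] := rfl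
  rw [← h0] at heq ⊢
  rw [heq]
  cases hb : ((PySem.List.pyRange 0 (D.length : Int) 1).foldl
      (pvB_i D (D.length : Int) ((PySem.List.enumerate D).map (pvB_rowsum (D.length : Int)))) (0, none)).2 with
  | none =>
    have := hinv hb
    simp [this, pvRender]
  | some ij =>
    cases ij with
    | mk i j =>
      simp only [pvRender, pvPath, pvFlt, pvD]
      rfl

-- ===== VERDICT (by name: the statement is the Claim_ definition above) =====
theorem find_maximum_distance_spec : Claim_equal_find_maximum_distance := by
  intro distances _ _
  unfold Spec_find_maximum_distance
  exact pv_main distances
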